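-- pv_equiv track=rewrite | github.com/mikoavelli/AOIS | lab1/main.py | multiplication_binary
-- ===== SOURCE A (Python) =====
-- NUMBER_OF_BINARY_DIGITS: int = 16
--
-- def to_binary(num: int, number_of_binary_digits: int = NUMBER_OF_BINARY_DIGITS) -> str:
--     local_num: int = num
--     result: str = ''
--
--     while local_num > 0:
--         result = str(local_num % 2) + result
--         local_num //= 2
--
--     return result.zfill(number_of_binary_digits)
--
-- def to_binary_direct(num: int, number_of_binary_digits: int = NUMBER_OF_BINARY_DIGITS) -> str:
--     if num >= 0:
--         return to_binary(num, number_of_binary_digits)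
--     return '1' + to_binary(abs(num), number_of_binary_digits)[1:]
--
-- def to_binary_reverse(num: int, number_of_binary_digits: int = NUMBER_OF_BINARY_DIGITS) -> str:
--     binary_num: str = to_binary(abs(num), number_of_binary_digits)
--
--     if num >= 0:
--         return binary_num
--
--     result: str = ''
--     for el in binary_num:
--         result += '1' if el == '0' else '0'
--     return result
--
-- def to_binary_additional(num: int, number_of_binary_digits: int = NUMBER_OF_BINARY_DIGITS) -> str:
--     binary_num: str = to_binary_reverse(num, number_of_binary_digits)
--
--     if num >= 0:
--         return binary_num
--
--     result: str = ''
--     add_term: int = 1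
--
--     for el in binary_num[::-1]:
--         current_sum: int = add_term + int(el)
--         if current_sum >= 2:
--             add_term = 1
--             result += '0'
--         else:
--             add_term = 0
--             result += str(current_sum)
--
--     return result[::-1]
--
-- def sum_binary(num_1, num_2, number_of_binary_digits: int = NUMBER_OF_BINARY_DIGITS) -> str:
--     binary_1: str = to_binary_additional(num_1, number_of_binary_digits) if type(num_1) is int else num_1
--     binary_2: str = to_binary_additional(num_2, number_of_binary_digits) if type(num_2) is int else num_2
--
--     binary_1, binary_2 = binary_1[::-1], binary_2[::-1]
--
--     result: str = ''
--     add_term: int = 0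
--
--     for i in range(len(binary_1)):
--         current_sum: int = add_term + int(binary_1[i]) + int(binary_2[i])
--         if current_sum >= 2:
--             add_term = 1
--             result += str(current_sum - 2)
--         else:
--             add_term = 0
--             result += str(current_sum)
--
--     return result[::-1]
--
-- def multiplication_binary(num_1: int, num_2: int, number_of_binary_digits: int = NUMBER_OF_BINARY_DIGITS) -> str:
--     sign: str = '1' if num_1 * num_2 < 0 else '0'
--     binary_1: str = to_binary_direct(num_1, number_of_binary_digits)[::-1]
--     binary_2: str = to_binary_direct(num_2, number_of_binary_digits)[::-1]
--     result: str = '0' * number_of_binary_digits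
--
--     for i in range(len(binary_2)):
--         if binary_2[i] == '0':
--             continue
--         temp: str = '0' * i + binary_1[:number_of_binary_digits - i]
--         result = sum_binary(result, temp[::-1], number_of_binary_digits)
--
--     return sign + result[1:]
-- ===== SOURCE B (Python) =====
-- def multiplication_binary(num_1: int, num_2: int, number_of_binary_digits: int = 16) -> str:
--     sign = '1' if num_1 * num_2 < 0 else '0'
--     d = number_of_binary_digits
--     if d <= 1:
--         return sign
--     mag = abs(num_1 * num_2) % 2 ** (d - 1)
--     return sign + format(mag, 'b').zfill(d - 1)
-- ===== Notes on version B (the rewrite author's own statement) =====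
-- stated objective: faster
-- what changed: Replaces the O(d^2) shift-and-add over sign-magnitude bit strings (char-by-char ripple-carry adder per set bit) by a closed form: multiply the integers directly, reduce the magnitude mod 2^(d-1), format it as a zero-padded binary string and prepend the sign bit.
import Mathlib
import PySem

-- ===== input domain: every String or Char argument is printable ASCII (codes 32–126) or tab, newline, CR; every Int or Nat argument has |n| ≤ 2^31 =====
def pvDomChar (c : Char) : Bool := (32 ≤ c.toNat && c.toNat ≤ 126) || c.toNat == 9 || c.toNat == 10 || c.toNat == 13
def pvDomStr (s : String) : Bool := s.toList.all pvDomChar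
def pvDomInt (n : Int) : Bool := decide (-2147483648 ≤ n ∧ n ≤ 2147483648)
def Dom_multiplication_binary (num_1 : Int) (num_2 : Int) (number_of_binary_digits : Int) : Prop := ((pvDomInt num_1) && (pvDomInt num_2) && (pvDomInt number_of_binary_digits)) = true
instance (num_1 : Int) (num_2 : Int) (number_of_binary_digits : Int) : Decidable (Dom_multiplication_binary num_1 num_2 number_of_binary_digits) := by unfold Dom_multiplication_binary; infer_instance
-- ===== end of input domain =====

-- B replaces A's O(d^2) per-bit shift-and-add over sign-magnitude bit strings by the closed form
-- sign bit + (|num_1*num_2| mod 2^(d-1)) formatted as a zero-padded binary string (measured faster).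


-- ===== PORT A =====

-- int(el) for the one-character digit strings A's adder reads (always a decimal digit there,
-- so int() never raises; the `.getD 0` arm is the unreachable ValueError case)
def pvCharInt (c : Char) : Int := (PySem.Int.ofChars? [c]).getD 0

-- the `while local_num > 0` loop of to_binary: prepends str(local_num % 2) each iteration
def pvToBinLoop (n : Int) : List Char :=
  if h : n > 0 then
    pvToBinLoop (PySem.Int.floordiv n 2) ++ PySem.Int.toChars (PySem.Int.mod n 2)
  else []
termination_by n.toNat
decreasing_by
  rw [PySem.Int.floordiv_eq_ediv_of_pos (by omega : (0:Int) < 2)]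
  omega

-- to_binary: loop result, then .zfill(number_of_binary_digits)
def pvToBinary (num : Int) (number_of_binary_digits : Int) : List Char :=
  PySem.Chars.zfill (pvToBinLoop num) number_of_binary_digits

-- to_binary_direct
def pvToBinaryDirect (num : Int) (number_of_binary_digits : Int) : List Char :=
  if num ≥ 0 then pvToBinary num number_of_binary_digits
  else '1' :: PySem.List.slice (pvToBinary |num| number_of_binary_digits) (some 1) none

-- sum_binary's for-loop over the two reversed strings (both arguments are str at A's call
-- sites, so the `type(...) is int` branches are resolved by typing); binary_2[i] becomes
-- positional traversal — at A's call sites binary_2 is at least as long as binary_1, so the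
-- headD default is never consulted where Python returns (Python would raise IndexError there)
def pvSumBinLoop : List Char → List Char → Int → List Char
  | [], _, _ => []
  | c :: cs, ds, add =>
    let cur : Int := add + pvCharInt c + pvCharInt (ds.headD '0')
    if cur ≥ 2 then PySem.Int.toChars (cur - 2) ++ pvSumBinLoop cs ds.tail 1
    else PySem.Int.toChars cur ++ pvSumBinLoop cs ds.tail 0

def pvSumBinary (binary_1 : List Char) (binary_2 : List Char) : List Char :=
  (pvSumBinLoop binary_1.reverse binary_2.reverse 0).reverse

-- the `for i in range(len(binary_2))` loop of multiplication_binary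
def pvMulLoop (binary_1 : List Char) (number_of_binary_digits : Int) :
    List Char → Nat → List Char → List Char
  | [], _, result => result
  | c :: rest, i, result =>
    if c = '0' then pvMulLoop binary_1 number_of_binary_digits rest (i + 1) result
    else
      pvMulLoop binary_1 number_of_binary_digits rest (i + 1)
        (pvSumBinary result
          (List.replicate i '0' ++
            PySem.List.slice binary_1 none (some (number_of_binary_digits - (i : Int)))).reverse)

def multiplication_binary (num_1 : Int) (num_2 : Int) (number_of_binary_digits : Int) : String :=
  let sign : Char := if num_1 * num_2 < 0 then '1' else '0'
  let binary_1 := (pvToBinaryDirect num_1 number_of_binary_digits).reverse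
  let binary_2 := (pvToBinaryDirect num_2 number_of_binary_digits).reverse
  let result := List.replicate number_of_binary_digits.toNat '0'
  String.mk (sign ::
    PySem.List.slice (pvMulLoop binary_1 number_of_binary_digits binary_2 0 result)
      (some 1) none)

-- ===== PORT B =====

-- format(m, 'b') for m > 0 (binary digits, most significant first)
def pvBits (m : Nat) : List Char :=
  if m = 0 then [] else pvBits (m / 2) ++ [if m % 2 = 1 then '1' else '0']
termination_by m
decreasing_by omega

-- format(m, 'b')
def pvFmtBin (m : Nat) : List Char := if m = 0 then ['0'] else pvBits m

def multiplication_binary_alt (num_1 : Int) (num_2 : Int) (number_of_binary_digits : Int) : String :=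
  let sign : Char := if num_1 * num_2 < 0 then '1' else '0'
  if number_of_binary_digits ≤ 1 then String.mk [sign]
  else
    let mag : Nat := (num_1 * num_2).natAbs % 2 ^ (number_of_binary_digits - 1).toNat
    String.mk (sign :: PySem.Chars.zfill (pvFmtBin mag) (number_of_binary_digits - 1))

-- ===== PRECONDITION & SPEC =====
def Spec_multiplication_binary (num_1 : Int) (num_2 : Int) (number_of_binary_digits : Int) (out : String) : Prop := out = multiplication_binary_alt num_1 num_2 number_of_binary_digits
instance (num_1 : Int) (num_2 : Int) (number_of_binary_digits : Int) (out : String) : Decidable (Spec_multiplication_binary num_1 num_2 number_of_binary_digits out) := by unfold Spec_multiplication_binary; infer_instance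

-- ===== CLAIM (what is proved, stated in full; the proofs are below) =====
def Claim_equal_multiplication_binary : Prop := ∀ (num_1 : Int) (num_2 : Int) (number_of_binary_digits : Int), Dom_multiplication_binary num_1 num_2 number_of_binary_digits → Spec_multiplication_binary num_1 num_2 number_of_binary_digits (multiplication_binary num_1 num_2 number_of_binary_digits)

-- ===== LEMMAS AND PROOFS =====

-- value of a bit character
def bitv (c : Char) : Nat := if c = '1' then 1 else 0

-- value of a least-significant-first bit list
def valL : List Char → Nat
  | [] => 0
  | c :: t => bitv c + 2 * valL t

-- value of a most-significant-first bit list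
def valM (l : List Char) : Nat := valL l.reverse

-- the k-digit least-significant-first binary representation of v (mod 2^k)
def reprL : Nat → Nat → List Char
  | 0, _ => []
  | k + 1, v => (if v % 2 = 1 then '1' else '0') :: reprL k (v / 2)

lemma bitv_le (c : Char) : bitv c ≤ 1 := by unfold bitv; split <;> omega

lemma valL_append (a b : List Char) : valL (a ++ b) = valL a + 2 ^ a.length * valL b := by
  induction a with
  | nil => simp [valL]
  | cons c t ih => simp [valL, ih, pow_succ]; ring

lemma valL_replicate (n : Nat) : valL (List.replicate n '0') = 0 := by
  induction n with
  | zero => rfl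
  | succ k ih => simp [List.replicate_succ, valL, ih, bitv]

lemma valM_pad (n : Nat) (l : List Char) : valM (List.replicate n '0' ++ l) = valM l := by
  simp [valM, List.reverse_append, valL_append, valL_replicate]

lemma length_reprL (k v : Nat) : (reprL k v).length = k := by
  induction k generalizing v with
  | zero => rfl
  | succ k ih => simp [reprL, ih]

lemma isBin_reprL (k v : Nat) : ∀ c ∈ reprL k v, c = '0' ∨ c = '1' := by
  induction k generalizing v with
  | zero => simp [reprL]
  | succ k ih =>
    intro c hc
    simp only [reprL, List.mem_cons] at hc
    rcases hc with rfl | hc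
    · split <;> simp
    · exact ih _ c hc

lemma valL_reprL (k v : Nat) : valL (reprL k v) = v % 2 ^ k := by
  induction k generalizing v with
  | zero => simp [reprL, valL, Nat.mod_one]
  | succ k ih =>
    have h1 : v % 2 ^ (k + 1) % 2 = v % 2 :=
      Nat.mod_mod_of_dvd v (by rw [pow_succ]; exact dvd_mul_left 2 (2 ^ k))
    have h2 : v % 2 ^ (k + 1) / 2 = v / 2 % 2 ^ k := by
      rw [pow_succ, mul_comm]; exact Nat.mod_mul_right_div_self v 2 (2 ^ k)
    have h3 : v % 2 ^ (k + 1) = v % 2 + 2 * (v / 2 % 2 ^ k) := by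
      rw [← h1, ← h2]; omega
    simp only [reprL, valL, ih, h3]
    split <;> simp [bitv] <;> omega

lemma reprL_mod (k v : Nat) : reprL k (v % 2 ^ k) = reprL k v := by
  induction k generalizing v with
  | zero => rfl
  | succ k ih =>
    have h1 : v % 2 ^ (k + 1) % 2 = v % 2 :=
      Nat.mod_mod_of_dvd v (by rw [pow_succ]; exact dvd_mul_left 2 (2 ^ k))
    have h2 : v % 2 ^ (k + 1) / 2 = v / 2 % 2 ^ k := by
      rw [pow_succ, mul_comm]; exact Nat.mod_mul_right_div_self v 2 (2 ^ k)
    show (if v % 2 ^ (k + 1) % 2 = 1 then '1' else '0') :: reprL k (v % 2 ^ (k + 1) / 2)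
        = (if v % 2 = 1 then '1' else '0') :: reprL k (v / 2)
    rw [h1, h2, ih (v / 2)]

lemma reprL_congr (k a b : Nat) (h : a % 2 ^ k = b % 2 ^ k) : reprL k a = reprL k b := by
  rw [← reprL_mod k a, h, reprL_mod]

lemma reprL_eq_self (l : List Char) (h : ∀ c ∈ l, c = '0' ∨ c = '1') :
    reprL l.length (valL l) = l := by
  induction l with
  | nil => rfl
  | cons c t ih =>
    have hc := h c (by simp)
    have hb := bitv_le c
    show (if valL (c :: t) % 2 = 1 then '1' else '0') :: reprL t.length (valL (c :: t) / 2) = c :: t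
    have hv : valL (c :: t) = bitv c + 2 * valL t := rfl
    have hh : (if valL (c :: t) % 2 = 1 then '1' else '0') = c := by
      rcases hc with rfl | rfl <;> simp [hv, bitv] <;> omega
    have ht : valL (c :: t) / 2 = valL t := by rw [hv]; omega
    rw [hh, ht, ih (fun x hx => h x (List.mem_cons_of_mem c hx))]

lemma reprL_succ (k v : Nat) :
    reprL (k + 1) v = reprL k v ++ [if v / 2 ^ k % 2 = 1 then '1' else '0'] := by
  induction k generalizing v with
  | zero => simp [reprL]
  | succ k ih =>
    have hd : v / 2 / 2 ^ k = v / 2 ^ (k + 1) := by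
      rw [Nat.div_div_eq_div_mul, pow_succ, mul_comm]
    rw [show reprL (k + 1 + 1) v = (if v % 2 = 1 then '1' else '0') :: reprL (k + 1) (v / 2) from rfl,
      ih (v / 2), hd,
      show reprL (k + 1) v = (if v % 2 = 1 then '1' else '0') :: reprL k (v / 2) from rfl]
    simp

lemma reprL_zero (k : Nat) : reprL k 0 = List.replicate k '0' := by
  induction k with
  | zero => rfl
  | succ k ih => simp [reprL, ih, List.replicate_succ]

lemma reprL_succ_cons (k T : Nat) :
    reprL (k + 1) (T % 2 ^ (k + 1)) =
      (if T % 2 = 1 then '1' else '0') :: reprL k (T / 2 % 2 ^ k) := by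
  simp only [reprL]
  have h1 : T % 2 ^ (k + 1) % 2 = T % 2 :=
    Nat.mod_mod_of_dvd T (by rw [pow_succ]; exact dvd_mul_left 2 (2 ^ k))
  have h2 : T % 2 ^ (k + 1) / 2 = T / 2 % 2 ^ k := by
    rw [pow_succ, mul_comm]
    exact Nat.mod_mul_right_div_self T 2 (2 ^ k)
  rw [h1, h2]

-- ---- A-side lemmas ----

lemma charInt_bit (c : Char) (h : c = '0' ∨ c = '1') : pvCharInt c = (bitv c : Int) := by
  rcases h with rfl | rfl <;> decide

lemma zfill_eq (cs : List Char) (w : Int) (h : ∀ c ∈ cs, c = '0' ∨ c = '1') :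
    PySem.Chars.zfill cs w = List.replicate (w.toNat - cs.length) '0' ++ cs := by
  unfold PySem.Chars.zfill
  split
  · rename_i hle
    have : w.toNat - cs.length = 0 := by omega
    simp [this]
  · rename_i hgt
    match cs, h with
    | [], _ => simp
    | c :: rest, h =>
      have hc := h c (by simp)
      have : ¬ (c = '+' ∨ c = '-') := by rcases hc with rfl | rfl <;> decide
      simp [this]

lemma valM_append_singleton (l : List Char) (c : Char) :
    valM (l ++ [c]) = bitv c + 2 * valM l := by
  simp [valM, List.reverse_append, valL]

lemma valM_cons (c : Char) (t : List Char) :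
    valM (c :: t) = valM t + 2 ^ t.length * bitv c := by
  simp [valM, List.reverse_cons, valL_append, valL]

lemma add_pow_modEq (a x e k : Nat) (h : k ≤ e) : a + 2 ^ e * x ≡ a [MOD 2 ^ k] := by
  have he : (2:Nat) ^ e * x = 2 ^ k * (2 ^ (e - k) * x) := by
    rw [← mul_assoc, ← pow_add]
    congr 2
    omega
  show (a + 2 ^ e * x) % 2 ^ k = a % 2 ^ k
  rw [he, Nat.add_mul_mod_self_left]

lemma toChars_mod_two (n : Int) (h : 0 < n) :
    PySem.Int.toChars (PySem.Int.mod n 2) = [if PySem.Int.mod n 2 = 1 then '1' else '0'] := by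
  have h0 := PySem.Int.mod_nonneg n (by omega : (0:Int) < 2)
  have h1 := PySem.Int.mod_lt n (by omega : (0:Int) < 2)
  interval_cases h2 : PySem.Int.mod n 2 <;> decide

lemma isBin_toBinLoop (n : Int) : ∀ c ∈ pvToBinLoop n, c = '0' ∨ c = '1' := by
  induction n using pvToBinLoop.induct with
  | case1 n h ih =>
    rw [pvToBinLoop, dif_pos h, toChars_mod_two n h]
    intro c hc
    rcases List.mem_append.mp hc with hc | hc
    · exact ih c hc
    · simp only [List.mem_singleton] at hc
      subst hc
      split <;> simp
  | case2 n h =>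
    rw [pvToBinLoop, dif_neg h]
    simp

lemma valM_toBinLoop (n : Int) : 0 ≤ n → valM (pvToBinLoop n) = n.toNat := by
  induction n using pvToBinLoop.induct with
  | case1 n h ih =>
    intro _
    rw [pvToBinLoop, dif_pos h, toChars_mod_two n h, valM_append_singleton,
      ih (by rw [PySem.Int.floordiv_eq_ediv_of_pos (by omega : (0:Int) < 2)]; omega)]
    rw [PySem.Int.floordiv_eq_ediv_of_pos (by omega : (0:Int) < 2)]
    rw [PySem.Int.mod_eq_emod_of_pos (by omega : (0:Int) < 2)]
    unfold bitv
    split <;> rename_i hm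
    · rw [if_pos rfl]
      omega
    · rw [if_neg (by decide)]
      omega
  | case2 n hng =>
    intro hn
    rw [pvToBinLoop, dif_neg hng]
    have : n = 0 := by omega
    subst this
    rfl

lemma toBinLoop_ne_nil (n : Int) (h : 0 < n) : pvToBinLoop n ≠ [] := by
  rw [pvToBinLoop, dif_pos h]
  have : PySem.Int.toChars (PySem.Int.mod n 2) ≠ [] := by
    have h0 := PySem.Int.mod_nonneg n (by omega : (0:Int) < 2)
    have h1 := PySem.Int.mod_lt n (by omega : (0:Int) < 2)
    interval_cases h : PySem.Int.mod n 2 <;> decide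
  intro hc
  exact this (List.append_eq_nil_iff.mp hc).2

lemma isBin_toBinary (n d : Int) (h : 0 ≤ n) : ∀ c ∈ pvToBinary n d, c = '0' ∨ c = '1' := by
  rw [pvToBinary, zfill_eq _ _ (isBin_toBinLoop n)]
  intro c hc
  rcases List.mem_append.mp hc with hc | hc
  · left; exact List.eq_of_mem_replicate hc
  · exact isBin_toBinLoop n c hc

lemma valM_toBinary (n d : Int) (h : 0 ≤ n) : valM (pvToBinary n d) = n.toNat := by
  rw [pvToBinary, zfill_eq _ _ (isBin_toBinLoop n), valM_pad, valM_toBinLoop n h]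

lemma length_toBinary (n d : Int) :
    (pvToBinary n d).length = max (pvToBinLoop n).length d.toNat :=
  PySem.Chars.length_zfill _ _

lemma isBin_direct (n d : Int) : ∀ c ∈ pvToBinaryDirect n d, c = '0' ∨ c = '1' := by
  unfold pvToBinaryDirect
  split
  · exact isBin_toBinary n d (by omega)
  · intro c hc
    rcases List.mem_cons.mp hc with rfl | hc
    · right; rfl
    · exact isBin_toBinary _ d (abs_nonneg n) c
        (PySem.List.mem_of_mem_slice _ _ _ hc)

lemma length_direct (n d : Int) : d.toNat ≤ (pvToBinaryDirect n d).length := by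
  unfold pvToBinaryDirect
  split
  · rw [length_toBinary]
    omega
  · rename_i hneg
    rw [PySem.List.slice_from_one]
    have h1 : 1 ≤ (pvToBinary |n| d).length := by
      rw [length_toBinary]
      have := toBinLoop_ne_nil |n| (abs_pos_of_neg (by omega))
      have : 0 < (pvToBinLoop |n|).length := List.length_pos_iff.mpr this
      omega
    have h2 : d.toNat ≤ (pvToBinary |n| d).length := by rw [length_toBinary]; omega
    simp only [List.length_cons, List.length_tail]
    omega

lemma valM_direct (n d : Int) :
    valM (pvToBinaryDirect n d) ≡ n.natAbs [MOD 2 ^ (d.toNat - 1)] := by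
  unfold pvToBinaryDirect
  split
  · rename_i hpos
    rw [valM_toBinary n d (by omega)]
    have : n.toNat = n.natAbs := by omega
    rw [this]
  · rename_i hneg
    rw [PySem.List.slice_from_one]
    set s := pvToBinary |n| d with hs
    have hlen1 : 1 ≤ s.length := by
      rw [hs, length_toBinary]
      have := toBinLoop_ne_nil |n| (abs_pos_of_neg (by omega))
      have : 0 < (pvToBinLoop |n|).length := List.length_pos_iff.mpr this
      omega
    obtain ⟨c, t, hct⟩ : ∃ c t, s = c :: t := by
      cases hsc : s with
      | nil => rw [hsc] at hlen1; simp at hlen1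
      | cons c t => exact ⟨c, t, rfl⟩
    have hlt : d.toNat - 1 ≤ t.length := by
      have : d.toNat ≤ s.length := by rw [hs, length_toBinary]; omega
      rw [hct] at this
      simp at this
      omega
    have hvs : valM s = n.natAbs := by
      rw [hs, valM_toBinary |n| d (abs_nonneg n), Int.abs_eq_natAbs]
      omega
    rw [hct]
    show valM ('1' :: t) ≡ n.natAbs [MOD 2 ^ (d.toNat - 1)]
    have e1 : valM ('1' :: t) = valM t + 2 ^ t.length * bitv '1' := valM_cons '1' t
    have e2 : valM (c :: t) = valM t + 2 ^ t.length * bitv c := valM_cons c t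
    calc valM ('1' :: t) = valM t + 2 ^ t.length * bitv '1' := e1
      _ ≡ valM t [MOD 2 ^ (d.toNat - 1)] := add_pow_modEq _ _ _ _ hlt
      _ ≡ valM t + 2 ^ t.length * bitv c [MOD 2 ^ (d.toNat - 1)] :=
          (add_pow_modEq _ _ _ _ hlt).symm
      _ = valM s := by rw [hct, e2]
      _ = n.natAbs := hvs

lemma valL_headD_tail (y : List Char) : valL y = bitv (y.headD '0') + 2 * valL y.tail := by
  cases y <;> simp [valL, bitv]

lemma sumBinLoop_spec (x : List Char) : ∀ (y : List Char) (a : Int), 0 ≤ a → a ≤ 1 →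
    (∀ c ∈ x, c = '0' ∨ c = '1') → (∀ c ∈ y, c = '0' ∨ c = '1') →
    pvSumBinLoop x y a = reprL x.length ((a.toNat + valL x + valL y) % 2 ^ x.length) := by
  induction x with
  | nil => intro y a _ _ _ _; rfl
  | cons c cs ih =>
    intro y a ha0 ha1 hx hy
    have hc : c = '0' ∨ c = '1' := hx c (by simp)
    have hhd : y.headD '0' = '0' ∨ y.headD '0' = '1' := by
      cases y with
      | nil => left; rfl
      | cons e t => exact hy e (by simp)
    have hcs : ∀ x ∈ cs, x = '0' ∨ x = '1' := fun x hxm => hx x (List.mem_cons_of_mem c hxm)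
    have hyt : ∀ x ∈ y.tail, x = '0' ∨ x = '1' := fun x hxm => hy x (List.mem_of_mem_tail hxm)
    have hvy : valL y = bitv (y.headD '0') + 2 * valL y.tail := valL_headD_tail y
    have hic : pvCharInt c = (bitv c : Int) := charInt_bit c hc
    have hihd : pvCharInt (y.headD '0') = (bitv (y.headD '0') : Int) := charInt_bit _ hhd
    have hb1 : bitv c ≤ 1 := bitv_le c
    have hb2 : bitv (y.headD '0') ≤ 1 := bitv_le _
    have hT : a.toNat + valL (c :: cs) + valL y
        = (a.toNat + bitv c + bitv (y.headD '0')) + 2 * (valL cs + valL y.tail) := by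
      show a.toNat + (bitv c + 2 * valL cs) + valL y = _
      rw [hvy]
      ring
    show (if a + pvCharInt c + pvCharInt (y.headD '0') ≥ 2 then
        PySem.Int.toChars (a + pvCharInt c + pvCharInt (y.headD '0') - 2) ++ pvSumBinLoop cs y.tail 1
      else PySem.Int.toChars (a + pvCharInt c + pvCharInt (y.headD '0')) ++ pvSumBinLoop cs y.tail 0) = _
    rw [hic, hihd, List.length_cons, hT]
    rw [reprL_succ_cons cs.length ((a.toNat + bitv c + bitv (y.headD '0')) + 2 * (valL cs + valL y.tail))]
    set S : Nat := a.toNat + bitv c + bitv (y.headD '0') with hSdef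
    have hSa : a + (bitv c : Int) + (bitv (y.headD '0') : Int) = (S : Int) := by
      rw [hSdef]; push_cast; omega
    rw [hSa]
    have hS3 : S ≤ 3 := by omega
    by_cases hge : (S : Int) ≥ 2
    · rw [if_pos hge]
      have hS : S = 2 ∨ S = 3 := by omega
      have hchar : PySem.Int.toChars ((S : Int) - 2) = [if (S + 2 * (valL cs + valL y.tail)) % 2 = 1 then '1' else '0'] := by
        rcases hS with h3 | h3 <;> rw [h3] <;>
          [rw [show ((2:Nat):Int) - 2 = 0 by omega, show ((2:Nat) + 2 * (valL cs + valL y.tail)) % 2 = 0 by omega];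
           rw [show ((3:Nat):Int) - 2 = 1 by omega, show ((3:Nat) + 2 * (valL cs + valL y.tail)) % 2 = 1 by omega]] <;>
        decide
      rw [hchar, ih y.tail 1 (by omega) le_rfl hcs hyt]
      have hdiv : (S + 2 * (valL cs + valL y.tail)) / 2 = (1:Int).toNat + valL cs + valL y.tail := by
        rw [show ((1:Int)).toNat = 1 from rfl]; omega
      rw [hdiv]
      simp
    · rw [if_neg hge]
      have hS : S = 0 ∨ S = 1 := by omega
      have hchar : PySem.Int.toChars (S : Int) = [if (S + 2 * (valL cs + valL y.tail)) % 2 = 1 then '1' else '0'] := by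
        rcases hS with h3 | h3 <;> rw [h3] <;>
          [rw [show ((0:Nat) + 2 * (valL cs + valL y.tail)) % 2 = 0 by omega];
           rw [show ((1:Nat) + 2 * (valL cs + valL y.tail)) % 2 = 1 by omega]] <;>
        decide
      rw [hchar, ih y.tail 0 le_rfl (by omega) hcs hyt]
      have hdiv : (S + 2 * (valL cs + valL y.tail)) / 2 = (0:Int).toNat + valL cs + valL y.tail := by
        rw [show ((0:Int)).toNat = 0 from rfl]; omega
      rw [hdiv]
      simp

lemma temp_val (b1 : List Char) (d : Int) (i : Nat) (hl : d.toNat ≤ b1.length) :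
    valL (List.replicate i '0' ++ PySem.List.slice b1 none (some (d - (i : Int))))
      ≡ 2 ^ i * valL b1 [MOD 2 ^ d.toNat] := by
  rw [valL_append, valL_replicate, List.length_replicate, zero_add]
  by_cases hdi : 0 ≤ d - (i : Int)
  · rw [PySem.List.slice_to _ hdi]
    set k := (d - (i : Int)).toNat with hkdef
    have hik : i + k = d.toNat := by omega
    have hkl : k ≤ b1.length := by omega
    have hsplit : valL b1 = valL (List.take k b1) + 2 ^ k * valL (List.drop k b1) := by
      conv_lhs => rw [← List.take_append_drop k b1]
      rw [valL_append, List.length_take, Nat.min_eq_left hkl]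
    show (2 ^ i * valL (List.take k b1)) % 2 ^ d.toNat = (2 ^ i * valL b1) % 2 ^ d.toNat
    rw [hsplit, mul_add, ← mul_assoc, ← pow_add, hik, Nat.add_mul_mod_self_left]
  · have hDi : d.toNat ≤ i := by omega
    have hdvd : (2:Nat) ^ d.toNat ∣ 2 ^ i := pow_dvd_pow 2 hDi
    have h1 : 2 ^ i * valL (PySem.List.slice b1 none (some (d - (i : Int)))) ≡ 0 [MOD 2 ^ d.toNat] :=
      (Nat.modEq_zero_iff_dvd).mpr (hdvd.mul_right _)
    have h2 : 2 ^ i * valL b1 ≡ 0 [MOD 2 ^ d.toNat] :=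
      (Nat.modEq_zero_iff_dvd).mpr (hdvd.mul_right _)
    exact h1.trans h2.symm

lemma mulLoop_spec (b1 : List Char) (d : Int)
    (hb : ∀ c ∈ b1, c = '0' ∨ c = '1') (hl : d.toNat ≤ b1.length) :
    ∀ (rest : List Char) (i v : Nat), (∀ c ∈ rest, c = '0' ∨ c = '1') →
    pvMulLoop b1 d rest i ((reprL d.toNat v).reverse)
      = (reprL d.toNat ((v + 2 ^ i * valL rest * valL b1) % 2 ^ d.toNat)).reverse := by
  intro rest
  induction rest with
  | nil =>
    intro i v _
    show (reprL d.toNat v).reverse = _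
    rw [show valL [] = 0 from rfl]
    rw [mul_zero, zero_mul, add_zero, reprL_mod]
  | cons c cs ih =>
    intro i v hbin
    have hc := hbin c (by simp)
    have hcs : ∀ x ∈ cs, x = '0' ∨ x = '1' := fun x hx => hbin x (List.mem_cons_of_mem c hx)
    rw [pvMulLoop]
    rcases hc with rfl | rfl
    · rw [if_pos rfl, ih (i + 1) v hcs]
      have : (2:Nat) ^ (i + 1) * valL cs = 2 ^ i * valL ('0' :: cs) := by
        rw [show valL ('0' :: cs) = 2 * valL cs from by simp [valL, bitv]]
        ring
      rw [this]
    · rw [if_neg (by decide)]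
      set temp := List.replicate i '0' ++ PySem.List.slice b1 none (some (d - (i : Int))) with htemp
      have htb : ∀ x ∈ temp, x = '0' ∨ x = '1' := by
        intro x hx
        rcases List.mem_append.mp hx with hm | hm
        · left; exact List.eq_of_mem_replicate hm
        · exact hb x (PySem.List.mem_of_mem_slice _ _ _ hm)
      have hrw : pvSumBinary ((reprL d.toNat v).reverse) temp.reverse
          = (reprL d.toNat ((v + valL temp) % 2 ^ d.toNat)).reverse := by
        rw [pvSumBinary, List.reverse_reverse, List.reverse_reverse,
          sumBinLoop_spec (reprL d.toNat v) temp 0 le_rfl (by omega) (isBin_reprL _ _) htb,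
          length_reprL, valL_reprL]
        rw [show ((0:Int)).toNat = 0 from rfl, zero_add, Nat.mod_add_mod]
      rw [hrw, ih (i + 1) ((v + valL temp) % 2 ^ d.toNat) hcs]
      apply congrArg
      apply reprL_congr
      have h1 : valL temp ≡ 2 ^ i * valL b1 [MOD 2 ^ d.toNat] := temp_val b1 d i hl
      have h2 : v + 2 ^ i * valL ('1' :: cs) * valL b1
          = v + 2 ^ i * valL b1 + 2 ^ (i + 1) * valL cs * valL b1 := by
        rw [show valL ('1' :: cs) = 1 + 2 * valL cs from by simp [valL, bitv]]
        ring
      rw [h2, Nat.mod_add_mod, Nat.mod_mod_of_dvd _ dvd_rfl, Nat.mod_mod_of_dvd _ dvd_rfl]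
      exact Nat.ModEq.add_right _ (Nat.ModEq.add_left v h1)

-- ---- B-side lemmas ----

lemma isBin_pvBits (m : Nat) : ∀ c ∈ pvBits m, c = '0' ∨ c = '1' := by
  induction m using pvBits.induct with
  | case1 => rw [pvBits, if_pos rfl]; simp
  | case2 m hm ih =>
    rw [pvBits, if_neg hm]
    intro c hc
    rcases List.mem_append.mp hc with hc | hc
    · exact ih c hc
    · simp only [List.mem_singleton] at hc
      subst hc
      split <;> simp

lemma valM_pvBits (m : Nat) : valM (pvBits m) = m := by
  induction m using pvBits.induct with
  | case1 => rw [pvBits, if_pos rfl]; rfl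
  | case2 m hm ih =>
    rw [pvBits, if_neg hm, valM_append_singleton, ih]
    unfold bitv
    split <;> rename_i hb
    · rw [if_pos rfl]
      omega
    · rw [if_neg (by decide)]
      omega

lemma length_pvBits_le (m : Nat) : ∀ k, m < 2 ^ k → (pvBits m).length ≤ k := by
  induction m using pvBits.induct with
  | case1 => intro k _; rw [pvBits, if_pos rfl]; simp
  | case2 m hm ih =>
    intro k hk
    rw [pvBits, if_neg hm]
    match k, hk with
    | 0, hk => omega
    | k + 1, hk =>
      have hp : (2:Nat) ^ (k + 1) = 2 * 2 ^ k := by rw [pow_succ]; ring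
      have := ih k (by omega)
      simp only [List.length_append, List.length_singleton]
      omega

lemma zfill_fmt (m k : Nat) (w : Int) (hw : w.toNat = k) (hm : m < 2 ^ k) (hk : 1 ≤ k) :
    PySem.Chars.zfill (pvFmtBin m) w = (reprL k m).reverse := by
  have hbin : ∀ c ∈ pvFmtBin m, c = '0' ∨ c = '1' := by
    unfold pvFmtBin
    split
    · simp
    · exact isBin_pvBits m
  rw [zfill_eq _ _ hbin]
  set l := List.replicate (w.toNat - (pvFmtBin m).length) '0' ++ pvFmtBin m with hl
  have hlenf : (pvFmtBin m).length ≤ k := by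
    unfold pvFmtBin
    split
    · simpa using hk
    · exact length_pvBits_le m k hm
  have hlenl : l.length = k := by
    rw [hl]
    simp only [List.length_append, List.length_replicate]
    omega
  have hvall : valM l = m := by
    rw [hl, valM_pad]
    unfold pvFmtBin
    split
    · rename_i h0
      subst h0
      rfl
    · exact valM_pvBits m
  have hbinl : ∀ c ∈ l, c = '0' ∨ c = '1' := by
    intro c hc
    rcases List.mem_append.mp hc with hc | hc
    · left; exact List.eq_of_mem_replicate hc
    · exact hbin c hc
  have huniq := reprL_eq_self l.reverse (by
    intro c hc
    exact hbinl c (List.mem_reverse.mp hc))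
  rw [List.length_reverse, hlenl] at huniq
  have : reprL k m = l.reverse := by
    rw [← hvall]
    exact huniq
  rw [this, List.reverse_reverse]

-- ===== VERDICT (by name: the statement is the Claim_ definition above) =====
theorem multiplication_binary_spec : Claim_equal_multiplication_binary := by
  intro num_1 num_2 d _
  show multiplication_binary num_1 num_2 d = multiplication_binary_alt num_1 num_2 d
  unfold multiplication_binary multiplication_binary_alt
  simp only []
  have h1b : ∀ c ∈ (pvToBinaryDirect num_1 d).reverse, c = '0' ∨ c = '1' := by
    intro c hc
    exact isBin_direct num_1 d c (List.mem_reverse.mp hc)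
  have h2b : ∀ c ∈ (pvToBinaryDirect num_2 d).reverse, c = '0' ∨ c = '1' := by
    intro c hc
    exact isBin_direct num_2 d c (List.mem_reverse.mp hc)
  have h1l : d.toNat ≤ (pvToBinaryDirect num_1 d).reverse.length := by
    rw [List.length_reverse]
    exact length_direct num_1 d
  have hinit : List.replicate d.toNat '0' = (reprL d.toNat 0).reverse := by
    rw [reprL_zero, List.reverse_replicate]
  rw [hinit, mulLoop_spec (pvToBinaryDirect num_1 d).reverse d h1b h1l
    (pvToBinaryDirect num_2 d).reverse 0 0 h2b]
  simp only [pow_zero, one_mul, zero_add]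
  rw [PySem.List.slice_from_one]
  by_cases hd1 : d ≤ 1
  · rw [if_pos hd1]
    have hD : d.toNat = 0 ∨ d.toNat = 1 := by omega
    rcases hD with hD | hD <;> rw [hD]
    · rfl
    · show String.mk (_ :: (reprL 1 _).reverse.tail) = _
      simp [reprL]
  · rw [if_neg hd1]
    obtain ⟨k, hk1, hk2⟩ : ∃ k, d.toNat = k + 1 ∧ 1 ≤ k := ⟨d.toNat - 1, by omega, by omega⟩
    have hA : ((reprL d.toNat ((valL (pvToBinaryDirect num_2 d).reverse *
        valL (pvToBinaryDirect num_1 d).reverse) % 2 ^ d.toNat)).reverse).tail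
        = (reprL k ((valL (pvToBinaryDirect num_2 d).reverse *
            valL (pvToBinaryDirect num_1 d).reverse) % 2 ^ d.toNat)).reverse := by
      rw [hk1, reprL_succ]
      simp
    rw [hA]
    have hmagk : (d - 1).toNat = k := by omega
    have hmlt : (num_1 * num_2).natAbs % 2 ^ (d - 1).toNat < 2 ^ k := by
      rw [hmagk]
      exact Nat.mod_lt _ (by positivity)
    rw [zfill_fmt ((num_1 * num_2).natAbs % 2 ^ (d - 1).toNat) k (d - 1) hmagk hmlt hk2]
    have hrepr : reprL k ((valL (pvToBinaryDirect num_2 d).reverse *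
        valL (pvToBinaryDirect num_1 d).reverse) % 2 ^ d.toNat)
        = reprL k ((num_1 * num_2).natAbs % 2 ^ (d - 1).toNat) := by
      apply reprL_congr
      have hdvd : (2:Nat) ^ k ∣ 2 ^ d.toNat := pow_dvd_pow 2 (by omega)
      have hPk : (valL (pvToBinaryDirect num_2 d).reverse *
          valL (pvToBinaryDirect num_1 d).reverse) % 2 ^ d.toNat
          ≡ valL (pvToBinaryDirect num_2 d).reverse *
            valL (pvToBinaryDirect num_1 d).reverse [MOD 2 ^ k] :=
        Nat.ModEq.of_dvd hdvd (Nat.mod_modEq _ _)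
      have h1 : valL (pvToBinaryDirect num_1 d).reverse ≡ num_1.natAbs [MOD 2 ^ k] := by
        have := valM_direct num_1 d
        rw [show d.toNat - 1 = k by omega] at this
        exact this
      have h2 : valL (pvToBinaryDirect num_2 d).reverse ≡ num_2.natAbs [MOD 2 ^ k] := by
        have := valM_direct num_2 d
        rw [show d.toNat - 1 = k by omega] at this
        exact this
      have hmm : (num_1 * num_2).natAbs % 2 ^ (d - 1).toNat
          ≡ (num_1 * num_2).natAbs [MOD 2 ^ k] := by
        rw [hmagk]
        exact Nat.mod_modEq _ _
      have habs : num_2.natAbs * num_1.natAbs = (num_1 * num_2).natAbs := by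
        rw [Int.natAbs_mul]
        ring
      exact hPk.trans ((h2.mul h1).trans (habs ▸ hmm.symm))
    rw [hrepr]
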